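-- pv_equiv track=rewrite | github.com/openvinotoolkit/openvino | tools/mo/openvino/tools/mo/ops/einsum.py | extract_subscript_labels
-- ===== SOURCE A (Python) =====
-- def extract_subscript_labels(node_name: str, subscript: str) -> list:
--     """
--     Extract labels for given subscript. Each label can be either alphabetic letter or ellipsis
--
--     :param node_name: Einsum node name
--     :param subscript: Given subscript
--     :return: A list of labels
--     """
--     labels = []
--     len_subscript = len(subscript)
--     label_ind = 0
--     while label_ind < len_subscript:
--         if subscript[label_ind].isalpha():
--             labels.append(subscript[label_ind])
--             label_ind += 1
--         elif len_subscript - label_ind > 2 and subscript[label_ind:label_ind + 3] == "...":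
--             labels.append("...")
--             label_ind += 3
--         else:
--             assert False, "Einsum node {} has `equation` with incorrect subscript: {}".format(node_name, subscript)
--     return labels
-- ===== SOURCE B (Python) =====
-- import re
--
-- def extract_subscript_labels(node_name: str, subscript: str) -> list:
--     labels = []
--     for token in re.findall(r'\.\.\.|[\s\S]', subscript):
--         if token == '...':
--             labels.append('...')
--         elif token.isalpha():
--             labels.append(token)
--         else:
--             assert False, "Einsum node {} has `equation` with incorrect subscript: {}".format(node_name, subscript)
--     return labels
-- ===== Notes on version B (the rewrite author's own statement) =====
-- stated objective: idiomatic
-- what changed: Replaced the manual index-based while-loop scan with a regex tokenization (greedy '...' alternative, else single characters) followed by a validation pass over the token list.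
import Mathlib
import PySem

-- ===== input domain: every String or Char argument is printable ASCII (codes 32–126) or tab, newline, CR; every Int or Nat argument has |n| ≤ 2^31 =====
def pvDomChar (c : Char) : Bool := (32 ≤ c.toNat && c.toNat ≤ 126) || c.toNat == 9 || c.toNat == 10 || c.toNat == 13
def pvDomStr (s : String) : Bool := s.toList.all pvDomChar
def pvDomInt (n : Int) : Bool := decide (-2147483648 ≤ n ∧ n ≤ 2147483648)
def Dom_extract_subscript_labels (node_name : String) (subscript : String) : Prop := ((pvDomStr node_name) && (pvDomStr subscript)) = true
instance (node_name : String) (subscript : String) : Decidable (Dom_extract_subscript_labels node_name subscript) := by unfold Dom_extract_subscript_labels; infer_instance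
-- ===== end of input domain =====

-- B replaces A's manual index-based while loop by a tokenize-then-validate pass (idiomatic; same cost).

-- ===== PORT A =====
-- A's while loop over label_ind, transcribed as recursion on the remaining suffix of characters
-- (labels = the accumulator). The 'assert False' branch has no value; it is unreachable under
-- Pre_, and the port returns the accumulator there.
def extract_subscript_labels.go (cs : List Char) (labels : List String) : List String :=
  match cs with
  | [] => labels
  | c :: rest =>
    if PySem.Chars.isalpha c then
      extract_subscript_labels.go rest (labels ++ [String.ofList [c]])
    else if (c :: rest).length > 2 ∧ (c :: rest).take 3 = ['.', '.', '.'] then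
      extract_subscript_labels.go ((c :: rest).drop 3) (labels ++ ["..."])
    else
      labels  -- assert False: unreachable inside Pre_
termination_by cs.length
decreasing_by all_goals simp

def extract_subscript_labels (node_name : String) (subscript : String) : List String :=
  extract_subscript_labels.go subscript.toList []

-- ===== PORT B =====
-- re.findall(r'\.\.\.|[\s\S]', subscript): the greedy '...' alternative, otherwise one character
def pvTokenize : List Char → List (List Char)
  | '.' :: '.' :: '.' :: rest => ['.', '.', '.'] :: pvTokenize rest
  | c :: rest => [c] :: pvTokenize rest
  | [] => []

-- the validation pass over the token list (the 'assert False' branch keeps labels: unreachable inside Pre_)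
def pvStep (labels : List String) (token : List Char) : List String :=
  if token = ['.', '.', '.'] then labels ++ ["..."]
  else if token.length = 1 ∧ token.all PySem.Chars.isalpha then labels ++ [String.ofList token]
  else labels

def extract_subscript_labels_alt (node_name : String) (subscript : String) : List String :=
  (pvTokenize subscript.toList).foldl pvStep []

-- ===== PRECONDITION & SPEC =====
-- Pre_ excludes exactly the inputs on which A raises AssertionError (B raises the same
-- AssertionError there): subscript must belong to the regular language (letter | "...")*,
-- i.e. be a sequence of alphabetic characters and '...' ellipses. pvValidSub is the standard
-- grammar-membership predicate for that language, not a copy of either port.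
def pvValidSub : List Char → Bool
  | [] => true | '.' :: '.' :: '.' :: r => pvValidSub r | c :: r => PySem.Chars.isalpha c && pvValidSub r

def Pre_extract_subscript_labels (node_name : String) (subscript : String) : Prop :=
  pvValidSub subscript.toList = true
instance (node_name : String) (subscript : String) : Decidable (Pre_extract_subscript_labels node_name subscript) := by unfold Pre_extract_subscript_labels; infer_instance

def pvWitness_extract_subscript_labels : String × String := ("node1", "ab...c")

def Spec_extract_subscript_labels (node_name : String) (subscript : String) (out : List String) : Prop := out = extract_subscript_labels_alt node_name subscript
instance (node_name : String) (subscript : String) (out : List String) : Decidable (Spec_extract_subscript_labels node_name subscript out) := by unfold Spec_extract_subscript_labels; infer_instance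

-- ===== CLAIM (what is proved, stated in full; the proofs are below) =====
def Claim_equal_extract_subscript_labels : Prop := ∀ (node_name : String) (subscript : String), Dom_extract_subscript_labels node_name subscript → Pre_extract_subscript_labels node_name subscript → Spec_extract_subscript_labels node_name subscript (extract_subscript_labels node_name subscript)

-- ===== LEMMAS AND PROOFS =====

-- reduction of the two overlapping-pattern functions on a head that is NOT a '...' start
lemma pvTokenize_cons_ne (c : Char) (rest : List Char)
    (h3 : ∀ r, c = '.' → rest = '.' :: '.' :: r → False) :
    pvTokenize (c :: rest) = [c] :: pvTokenize rest := by
  rw [pvTokenize.eq_def]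
  split
  · exfalso
    rename_i r heq
    injection heq with h1 h2
    exact h3 r h1 h2
  · rename_i heq
    injection heq with h1 h2
    rw [h1, h2]
  · rename_i heq
    exact absurd heq (by simp)

lemma pvValidSub_cons_ne (c : Char) (rest : List Char)
    (h3 : ∀ r, c = '.' → rest = '.' :: '.' :: r → False) :
    pvValidSub (c :: rest) = (PySem.Chars.isalpha c && pvValidSub rest) := by
  rw [pvValidSub.eq_def]
  split
  · rename_i heq
    exact absurd heq (by simp)
  · exfalso
    rename_i r heq
    injection heq with h1 h2
    exact h3 r h1 h2
  · rename_i heq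
    injection heq with h1 h2
    rw [h1, h2]

lemma go_eq_foldl (cs : List Char) (h : pvValidSub cs = true) (labels : List String) :
    extract_subscript_labels.go cs labels = (pvTokenize cs).foldl pvStep labels := by
  induction cs using pvValidSub.induct generalizing labels with
  | case1 => simp [extract_subscript_labels.go, pvTokenize]
  | case2 rest ih =>
    rw [pvValidSub] at h
    rw [extract_subscript_labels.go,
        if_neg (by decide), if_pos (by simp)]
    rw [pvTokenize, List.foldl_cons]
    simp only [List.drop_succ_cons, List.drop_zero]
    rw [ih h]
    rfl
  | case3 c rest hne ih =>
    rw [pvValidSub_cons_ne c rest hne, Bool.and_eq_true] at h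
    rw [extract_subscript_labels.go, if_pos h.1]
    rw [pvTokenize_cons_ne c rest hne, List.foldl_cons]
    rw [ih h.2]
    congr 1
    simp [pvStep, h.1]

-- ===== VERDICT (by name: the statement is the Claim_ definition above) =====
theorem extract_subscript_labels_spec : Claim_equal_extract_subscript_labels := by
  intro node_name subscript _ hpre
  unfold Spec_extract_subscript_labels extract_subscript_labels extract_subscript_labels_alt
  exact go_eq_foldl subscript.toList hpre []
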